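-- pv_equiv track=rewrite | github.com/awesome-archive/d2l-book | d2lbook/build.py | _match_back_quote
-- ===== SOURCE A (Python) =====
-- def _match_back_quote(line):
--     mark = ''
--     for char in line:
--         if char == '`':
--             mark += '`'
--         else:
--             break
--     return mark
-- ===== SOURCE B (Python) =====
-- def _match_back_quote(line):
--     count = len(line) - len(line.lstrip('`'))
--     return '`' * count
-- ===== Notes on version B (the rewrite author's own statement) =====
-- stated objective: simpler
-- what changed: Replaces the char-by-char loop with break by a closed-form length difference: len(line) - len(line.lstrip('`')) gives the count of leading backticks, returned as '`' * count.
import Mathlib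
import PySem

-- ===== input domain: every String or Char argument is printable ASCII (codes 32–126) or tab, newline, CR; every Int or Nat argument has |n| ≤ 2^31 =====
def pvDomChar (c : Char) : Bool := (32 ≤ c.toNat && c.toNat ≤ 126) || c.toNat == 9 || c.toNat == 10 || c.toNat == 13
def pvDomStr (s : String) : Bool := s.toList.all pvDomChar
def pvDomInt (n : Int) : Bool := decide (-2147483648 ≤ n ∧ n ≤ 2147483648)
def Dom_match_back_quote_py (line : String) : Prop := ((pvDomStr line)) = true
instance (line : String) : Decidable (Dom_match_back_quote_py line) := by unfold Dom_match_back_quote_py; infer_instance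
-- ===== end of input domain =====

-- B replaces A's char-by-char loop with a closed-form length difference (simpler; same cost).

-- ===== PORT A =====
-- loop: for char in line: if '`' then mark += '`' else break
def maLoop (mark : String) : List Char → String
  | [] => mark
  | c :: cs => if c = '`' then maLoop (mark ++ "`") cs else mark

def match_back_quote_py (line : String) : String := maLoop "" line.toList

-- ===== PORT B =====
-- line.lstrip('`') : exact hand port of str.lstrip with the single-char set {'`'}
def mbLstripBt (cs : List Char) : List Char := cs.dropWhile (· = '`')

def match_back_quote_py_alt (line : String) : String :=
  let count := line.toList.length - (mbLstripBt line.toList).length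
  String.ofList (List.replicate count '`')

-- ===== PRECONDITION & SPEC =====
def Spec_match_back_quote_py (line : String) (out : String) : Prop := out = match_back_quote_py_alt line
instance (line : String) (out : String) : Decidable (Spec_match_back_quote_py line out) := by unfold Spec_match_back_quote_py; infer_instance

-- ===== CLAIM (what is proved, stated in full; the proofs are below) =====
def Claim_equal_match_back_quote_py : Prop := ∀ (line : String), Dom_match_back_quote_py line → Spec_match_back_quote_py line (match_back_quote_py line)

-- ===== LEMMAS AND PROOFS =====
theorem maLoop_eq (l : List Char) : ∀ (acc : String),
    maLoop acc l = acc ++ String.ofList (List.replicate (l.takeWhile (· = '`')).length '`') := by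
  induction l with
  | nil => intro acc; simp [maLoop]
  | cons c cs ih =>
    intro acc
    by_cases h : c = '`'
    · simp only [maLoop, h, ih, List.takeWhile_cons, decide_true, if_pos, List.length_cons]
      apply String.ext
      simp [List.replicate_succ]
    · simp [maLoop, h]

theorem len_sub_dropWhile (l : List Char) :
    l.length - (l.dropWhile (· = '`')).length = (l.takeWhile (· = '`')).length := by
  have h := List.takeWhile_append_dropWhile (p := (· = '`')) (l := l)
  have : (l.takeWhile (· = '`')).length + (l.dropWhile (· = '`')).length = l.length := by
    conv_rhs => rw [← h]
    rw [List.length_append]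
  omega

-- ===== VERDICT (by name: the statement is the Claim_ definition above) =====
theorem match_back_quote_py_spec : Claim_equal_match_back_quote_py := by
  intro line _
  unfold Spec_match_back_quote_py match_back_quote_py match_back_quote_py_alt mbLstripBt
  rw [maLoop_eq, len_sub_dropWhile]
  apply String.ext
  simp
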